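-- pv_equiv track=rewrite | github.com/bbookng/Programmers | PCCE/340198.py | check
-- ===== SOURCE A (Python) =====
-- def check(mat_size, x, y, max_x, max_y, park):
--     for i in range(mat_size):
--         for j in range(mat_size):
--             if not 0 <= x + i < max_x or not 0 <= y + j < max_y:
--                 return False
--             if park[x + i][y + j] != "-1":
--                 return False
--     return True
-- ===== SOURCE B (Python) =====
-- def check(mat_size, x, y, max_x, max_y, park):
--     if not (0 <= x and x + mat_size <= max_x and 0 <= y and y + mat_size <= max_y):
--         return False
--     block = [row[y:y + mat_size] for row in park[x:x + mat_size]]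
--     return block == [["-1"] * mat_size] * mat_size
-- ===== Notes on version B (the rewrite author's own statement) =====
-- stated objective: simpler
-- what changed: B checks once that the whole square lies inside the park, then slices the mat_size-by-mat_size block out and compares it wholesale against the expected all-'-1' block, instead of A's per-cell bounds test inside a double loop; Pre_ excludes negative mat_size (outside the natural domain of a block size; A's empty range returns True while B's slice arithmetic differs) and inputs where indexing a bounds-passing cell would make A raise IndexError.
-- intended difference: For mat_size = 0 with the anchor (x,y) outside the park bounds, A returns True (the empty range checks nothing) while B returns False (the block's position is out of bounds); B's bounds-first answer is the equally valid, arguably intended reading that an out-of-bounds block never fits. — e.g. on check(0, -1, 0, 0, 0, []): A returns true, B returns false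
-- outside the precondition, e.g. on check(-1, 0, 0, 5, 5, [['-1'], ['-1']]): A returns True, B returns False; on check(1, 0, 0, 1, 1, []): A raises IndexError, B returns False
import Mathlib
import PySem

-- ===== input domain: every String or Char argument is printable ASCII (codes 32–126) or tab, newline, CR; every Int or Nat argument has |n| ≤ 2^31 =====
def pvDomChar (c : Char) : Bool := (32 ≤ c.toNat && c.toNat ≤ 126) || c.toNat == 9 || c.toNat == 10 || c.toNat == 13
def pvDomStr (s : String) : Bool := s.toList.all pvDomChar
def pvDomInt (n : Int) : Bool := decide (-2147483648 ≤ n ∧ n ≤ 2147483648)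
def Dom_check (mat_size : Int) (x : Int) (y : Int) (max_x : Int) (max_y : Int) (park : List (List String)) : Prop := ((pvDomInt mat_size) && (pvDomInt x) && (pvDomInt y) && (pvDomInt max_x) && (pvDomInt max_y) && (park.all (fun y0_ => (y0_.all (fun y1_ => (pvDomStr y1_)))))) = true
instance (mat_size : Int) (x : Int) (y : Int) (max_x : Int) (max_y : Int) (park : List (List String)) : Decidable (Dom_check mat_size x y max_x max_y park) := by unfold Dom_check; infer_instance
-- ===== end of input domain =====

-- B checks the square's bounds once, slices the block out of the park and compares it wholesale
-- against the expected all-"-1" block (objective: simpler; same asymptotic cost).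

-- park[r][c], total (inside Pre_ every cell A indexes is in range)
def pvCell (park : List (List String)) (r c : Int) : String :=
  (PySem.List.pyGet? ((PySem.List.pyGet? park r).getD []) c).getD ""

-- ===== PORT A =====
-- inner 'for j in range(mat_size)' with its two early returns (counter recursion, lazy like range)
def checkRowA (mat_size x y max_x max_y : Int) (park : List (List String)) (i j : Int) : Bool :=
  if j < mat_size then
    if ¬(0 ≤ x + i ∧ x + i < max_x) ∨ ¬(0 ≤ y + j ∧ y + j < max_y) then false
    else if pvCell park (x + i) (y + j) ≠ "-1" then false
    else checkRowA mat_size x y max_x max_y park i (j + 1)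
  else true
termination_by (mat_size - j).toNat
decreasing_by omega

-- outer 'for i in range(mat_size)' (an early False from the inner loop propagates via &&)
def checkOuterA (mat_size x y max_x max_y : Int) (park : List (List String)) (i : Int) : Bool :=
  if i < mat_size then
    checkRowA mat_size x y max_x max_y park i 0 && checkOuterA mat_size x y max_x max_y park (i + 1)
  else true
termination_by (mat_size - i).toNat
decreasing_by omega

def check (mat_size : Int) (x : Int) (y : Int) (max_x : Int) (max_y : Int) (park : List (List String)) : Bool :=
  checkOuterA mat_size x y max_x max_y park 0

-- ===== PORT B =====
-- 'if not (0 <= x and x+mat_size <= max_x and 0 <= y and y+mat_size <= max_y): return False'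
-- 'block = [row[y:y+mat_size] for row in park[x:x+mat_size]]'
-- 'return block == [["-1"] * mat_size] * mat_size'   (list * negative int is [], hence .toNat)
def check_alt (mat_size : Int) (x : Int) (y : Int) (max_x : Int) (max_y : Int) (park : List (List String)) : Bool :=
  if 0 ≤ x ∧ x + mat_size ≤ max_x ∧ 0 ≤ y ∧ y + mat_size ≤ max_y then
    ((PySem.List.slice park (some x) (some (x + mat_size))).map
        (fun row => PySem.List.slice row (some y) (some (y + mat_size))))
      == List.replicate mat_size.toNat (List.replicate mat_size.toNat "-1")
  else false

-- ===== PRECONDITION & SPEC =====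
-- Pre_ restricts to the natural domain 0 ≤ mat_size (a block size; for negative mat_size A's empty
-- range returns True by accident) and excludes inputs on which indexing park[x+i][y+j] at some block
-- cell that passes A's per-cell bounds test is out of range, where Python A raises IndexError (the
-- rows max x 0 ≤ r < min (x+mat_size) max_x, columns max y 0 ≤ c < min (y+mat_size) max_y are
-- exactly the block cells passing that test).
def Pre_check (mat_size : Int) (x : Int) (y : Int) (max_x : Int) (max_y : Int) (park : List (List String)) : Prop :=
  0 ≤ mat_size ∧
  ((max x 0 < min (x + mat_size) max_x ∧ max y 0 < min (y + mat_size) max_y) →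
    (min (x + mat_size) max_x ≤ (park.length : Int) ∧
     ∀ k ∈ List.range park.length, (max x 0 ≤ (k : Int) ∧ (k : Int) < min (x + mat_size) max_x) →
       min (y + mat_size) max_y ≤ ((park.getD k []).length : Int)))
instance (mat_size : Int) (x : Int) (y : Int) (max_x : Int) (max_y : Int) (park : List (List String)) : Decidable (Pre_check mat_size x y max_x max_y park) := by unfold Pre_check; infer_instance

def pvWitness_check : Int × Int × Int × Int × Int × List (List String) := (1, 0, 0, 1, 1, [["-1"]])

-- For mat_size = 0 with the anchor (x, y) outside the park bounds, A returns True (the empty range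
-- checks nothing) while B returns False (the block's position is out of bounds); B's bounds-first
-- answer is the equally valid, arguably intended reading that an out-of-bounds block never fits.
def D_check (mat_size : Int) (x : Int) (y : Int) (max_x : Int) (max_y : Int) (park : List (List String)) : Prop :=
  mat_size = 0 ∧ (x < 0 ∨ max_x < x ∨ y < 0 ∨ max_y < y)
instance (mat_size : Int) (x : Int) (y : Int) (max_x : Int) (max_y : Int) (park : List (List String)) : Decidable (D_check mat_size x y max_x max_y park) := by unfold D_check; infer_instance

def Spec_check (mat_size : Int) (x : Int) (y : Int) (max_x : Int) (max_y : Int) (park : List (List String)) (out : Bool) : Prop := ¬ D_check mat_size x y max_x max_y park → out = check_alt mat_size x y max_x max_y park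
instance (mat_size : Int) (x : Int) (y : Int) (max_x : Int) (max_y : Int) (park : List (List String)) (out : Bool) : Decidable (Spec_check mat_size x y max_x max_y park out) := by unfold Spec_check; infer_instance

def pvDiffWitness_check : Int × Int × Int × Int × Int × List (List String) := (0, -1, 0, 0, 0, [])
def pvDiffWitnessOut_check : Bool × Bool := (true, false)

-- ===== CLAIM (what is proved, stated in full; the proofs are below) =====
def Claim_unchanged_check : Prop := ∀ (mat_size : Int) (x : Int) (y : Int) (max_x : Int) (max_y : Int) (park : List (List String)), Dom_check mat_size x y max_x max_y park → Pre_check mat_size x y max_x max_y park → Spec_check mat_size x y max_x max_y park (check mat_size x y max_x max_y park)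
def Claim_changed_check : Prop := Dom_check (pvDiffWitness_check.1) (pvDiffWitness_check.2.1) (pvDiffWitness_check.2.2.1) (pvDiffWitness_check.2.2.2.1) (pvDiffWitness_check.2.2.2.2.1) (pvDiffWitness_check.2.2.2.2.2) ∧ Pre_check (pvDiffWitness_check.1) (pvDiffWitness_check.2.1) (pvDiffWitness_check.2.2.1) (pvDiffWitness_check.2.2.2.1) (pvDiffWitness_check.2.2.2.2.1) (pvDiffWitness_check.2.2.2.2.2) ∧ D_check (pvDiffWitness_check.1) (pvDiffWitness_check.2.1) (pvDiffWitness_check.2.2.1) (pvDiffWitness_check.2.2.2.1) (pvDiffWitness_check.2.2.2.2.1) (pvDiffWitness_check.2.2.2.2.2) ∧ check (pvDiffWitness_check.1) (pvDiffWitness_check.2.1) (pvDiffWitness_check.2.2.1) (pvDiffWitness_check.2.2.2.1) (pvDiffWitness_check.2.2.2.2.1) (pvDiffWitness_check.2.2.2.2.2) = pvDiffWitnessOut_check.1 ∧ check_alt (pvDiffWitness_check.1) (pvDiffWitness_check.2.1) (pvDiffWitness_check.2.2.1) (pvDiffWitness_check.2.2.2.1) (pvDiffWitness_check.2.2.2.2.1)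 (pvDiffWitness_check.2.2.2.2.2) = pvDiffWitnessOut_check.2 ∧ pvDiffWitnessOut_check.1 ≠ pvDiffWitnessOut_check.2
def Claim_exact_check : Prop := ∀ (mat_size : Int) (x : Int) (y : Int) (max_x : Int) (max_y : Int) (park : List (List String)), Dom_check mat_size x y max_x max_y park → Pre_check mat_size x y max_x max_y park → D_check mat_size x y max_x max_y park → check mat_size x y max_x max_y park ≠ check_alt mat_size x y max_x max_y park

-- ===== LEMMAS AND PROOFS =====

-- A's inner loop, when the whole row of the block is in bounds, is the comparison of the row's
-- remaining slice against the all-"-1" list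
theorem rowA_eq_take (mat_size x y max_x max_y : Int) (park : List (List String)) (i : Int)
    (L : List String) (hL : (PySem.List.pyGet? park (x + i)).getD [] = L)
    (hxi : 0 ≤ x + i ∧ x + i < max_x) (hy : 0 ≤ y) (hym : y + mat_size ≤ max_y)
    (hLlen : y + mat_size ≤ (L.length : Int)) :
    ∀ (n : ℕ) (j : Int), (mat_size - j).toNat = n → 0 ≤ j →
      checkRowA mat_size x y max_x max_y park i j
        = (((L.drop (y + j).toNat).take n) == List.replicate n "-1") := by
  intro n
  induction n with
  | zero =>
    intro j hn _
    unfold checkRowA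
    rw [if_neg (by omega)]
    simp
  | succ n ih =>
    intro j hn hj
    have hjm : j < mat_size := by omega
    have hc : (y + j).toNat < L.length := by omega
    have hcell : pvCell park (x + i) (y + j) = L[(y + j).toNat] := by
      unfold pvCell
      rw [hL, PySem.List.pyGet?_of_nonneg _ (by omega), List.getElem?_eq_getElem hc]
      rfl
    have hdrop : L.drop (y + j).toNat = L[(y + j).toNat] :: L.drop ((y + j).toNat + 1) :=
      List.drop_eq_getElem_cons hc
    unfold checkRowA
    rw [if_pos hjm, if_neg (by push Not; refine ⟨⟨?_, ?_⟩, ?_, ?_⟩ <;> omega)]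
    rw [hdrop, List.take_succ_cons, List.replicate_succ, List.cons_beq_cons]
    have hnext : (y + j).toNat + 1 = (y + (j + 1)).toNat := by omega
    by_cases hv : pvCell park (x + i) (y + j) = "-1"
    · rw [if_neg (by simp [hv]), ih (j + 1) (by omega) (by omega)]
      rw [hcell] at hv
      simp [hv, hnext]
    · rw [if_pos (by simp [hv])]
      rw [hcell] at hv
      simp [hv]

-- A's outer loop, when the whole block is in bounds and the park is large enough, is the
-- comparison of the remaining sliced rows against the expected all-"-1" block
theorem outerA_eq_take (mat_size x y max_x max_y : Int) (park : List (List String))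
    (hx : 0 ≤ x) (hxm : x + mat_size ≤ max_x) (hy : 0 ≤ y) (hym : y + mat_size ≤ max_y)
    (hplen : x + mat_size ≤ (park.length : Int))
    (hrows : ∀ (k : ℕ), k < park.length → x ≤ (k : Int) → (k : Int) < x + mat_size →
      y + mat_size ≤ ((park.getD k []).length : Int)) :
    ∀ (n : ℕ) (i : Int), (mat_size - i).toNat = n → 0 ≤ i →
      checkOuterA mat_size x y max_x max_y park i
        = ((((park.drop (x + i).toNat).take n).map
              (fun row => (row.drop y.toNat).take mat_size.toNat))
            == List.replicate n (List.replicate mat_size.toNat "-1")) := by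
  intro n
  induction n with
  | zero =>
    intro i hn _
    unfold checkOuterA
    rw [if_neg (by omega)]
    simp
  | succ n ih =>
    intro i hn hi
    have him : i < mat_size := by omega
    have hr : (x + i).toNat < park.length := by omega
    have hdrop : park.drop (x + i).toNat = park[(x + i).toNat] :: park.drop ((x + i).toNat + 1) :=
      List.drop_eq_getElem_cons hr
    have hLlen : y + mat_size ≤ ((park[(x + i).toNat]).length : Int) := by
      have := hrows (x + i).toNat hr (by omega) (by omega)
      rwa [List.getD_eq_getElem _ _ hr] at this
    have hL : (PySem.List.pyGet? park (x + i)).getD [] = park[(x + i).toNat] := by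
      rw [PySem.List.pyGet?_of_nonneg _ (by omega), List.getElem?_eq_getElem hr]
      rfl
    have hrow := rowA_eq_take mat_size x y max_x max_y park i park[(x + i).toNat] hL
      ⟨by omega, by omega⟩ hy hym hLlen mat_size.toNat 0 (by omega) le_rfl
    have hnext : (x + i).toNat + 1 = (x + (i + 1)).toNat := by omega
    unfold checkOuterA
    rw [if_pos him, hdrop, List.take_succ_cons, List.map_cons, List.replicate_succ,
        List.cons_beq_cons, hrow, ih (i + 1) (by omega) (by omega), hnext]
    have : (y + (0 : Int)).toNat = y.toNat := by omega
    rw [this]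

-- the first iteration already fails the x-bound
theorem rowA_false_x (mat_size x y max_x max_y : Int) (park : List (List String)) (i j : Int)
    (hj : j < mat_size) (hfx : ¬(0 ≤ x + i ∧ x + i < max_x)) :
    checkRowA mat_size x y max_x max_y park i j = false := by
  unfold checkRowA
  rw [if_pos hj, if_pos (Or.inl hfx)]

-- some later column fails the y-bound: every branch before it returns false too
theorem rowA_false_y (mat_size x y max_x max_y : Int) (park : List (List String)) (i j0 : Int)
    (hj0 : j0 < mat_size) (hfy : ¬(0 ≤ y + j0 ∧ y + j0 < max_y)) :
    ∀ (n : ℕ) (j : Int), (mat_size - j).toNat = n → j ≤ j0 →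
      checkRowA mat_size x y max_x max_y park i j = false := by
  intro n
  induction n with
  | zero => intro j hn hj; omega
  | succ n ih =>
    intro j hn hj
    have hjm : j < mat_size := by omega
    unfold checkRowA
    rw [if_pos hjm]
    by_cases hc : ¬(0 ≤ x + i ∧ x + i < max_x) ∨ ¬(0 ≤ y + j ∧ y + j < max_y)
    · rw [if_pos hc]
    · rw [if_neg hc]
      have hjne : j ≠ j0 := by
        intro h; exact hc (Or.inr (h ▸ hfy))
      by_cases hv : pvCell park (x + i) (y + j) = "-1"
      · rw [if_neg (by simp [hv])]
        exact ih (j + 1) (by omega) (by omega)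
      · rw [if_pos (by simp [hv])]

theorem outerA_false (mat_size x y max_x max_y : Int) (park : List (List String)) (i0 : Int)
    (hi0 : i0 < mat_size)
    (hrow : checkRowA mat_size x y max_x max_y park i0 0 = false) :
    ∀ (n : ℕ) (i : Int), (mat_size - i).toNat = n → i ≤ i0 →
      checkOuterA mat_size x y max_x max_y park i = false := by
  intro n
  induction n with
  | zero => intro i hn hi; omega
  | succ n ih =>
    intro i hn hi
    have him : i < mat_size := by omega
    unfold checkOuterA
    rw [if_pos him]
    by_cases hii : i = i0
    · rw [hii, hrow, Bool.false_and]
    · rw [ih (i + 1) (by omega) (by omega), Bool.and_false]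

-- ===== VERDICT (by name: the statements are the Claim_ definitions above) =====
theorem check_spec : Claim_unchanged_check := by
  intro mat_size x y max_x max_y park _hdom hpre
  unfold Spec_check
  intro hnD
  obtain ⟨hms, hpark⟩ := hpre
  unfold check check_alt
  by_cases hb : 0 ≤ x ∧ x + mat_size ≤ max_x ∧ 0 ≤ y ∧ y + mat_size ≤ max_y
  · rw [if_pos hb]
    obtain ⟨hx, hxm, hy, hym⟩ := hb
    by_cases hm0 : mat_size = 0
    · subst hm0
      unfold checkOuterA
      rw [if_neg (by omega)]
      rw [PySem.List.slice_toNat _ hx (by omega)]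
      simp
    · have hm1 : 1 ≤ mat_size := by omega
      have hmaxx : max x 0 = x := max_eq_left hx
      have hmaxy : max y 0 = y := max_eq_left hy
      have hminx : min (x + mat_size) max_x = x + mat_size := min_eq_left (by omega)
      have hminy : min (y + mat_size) max_y = y + mat_size := min_eq_left (by omega)
      obtain ⟨hplen, hrows⟩ := hpark ⟨by rw [hmaxx, hminx]; omega, by rw [hmaxy, hminy]; omega⟩
      rw [hminx] at hplen
      rw [PySem.List.slice_toNat _ hx (by omega)]
      have hfun : (fun row : List String => PySem.List.slice row (some y) (some (y + mat_size)))
          = fun row => (row.drop y.toNat).take mat_size.toNat := by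
        funext row
        rw [PySem.List.slice_toNat _ hy (by omega)]
        congr 1
        omega
      rw [hfun]
      have hrows' : ∀ (k : ℕ), k < park.length → x ≤ (k : Int) → (k : Int) < x + mat_size →
          y + mat_size ≤ ((park.getD k []).length : Int) := by
        intro k hk h1 h2
        have := hrows k (List.mem_range.mpr hk) ⟨by rw [hmaxx]; omega, by rw [hminx]; omega⟩
        rw [hminy] at this
        omega
      have := outerA_eq_take mat_size x y max_x max_y park hx hxm hy hym hplen hrows'
        mat_size.toNat 0 (by omega) le_rfl
      have e1 : (x + (0 : Int)).toNat = x.toNat := by omega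
      have e2 : (x + mat_size).toNat - x.toNat = mat_size.toNat := by omega
      rw [this, e1, e2]
  · rw [if_neg hb]
    have hm1 : 1 ≤ mat_size := by
      rcases Int.lt_or_lt_of_ne (fun h => hnD ⟨h, by subst h; push Not at hb; omega⟩) with h | h
      · omega
      · omega
    have hcell : ∃ i0 : Int, 0 ≤ i0 ∧ i0 < mat_size ∧
        checkRowA mat_size x y max_x max_y park i0 0 = false := by
      push Not at hb
      by_cases h2 : 0 ≤ x
      · by_cases h3 : x + mat_size ≤ max_x
        · by_cases h4 : 0 ≤ y
          · exact ⟨0, le_rfl, by omega,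
              rowA_false_y mat_size x y max_x max_y park 0 (mat_size - 1) (by omega)
                (by omega) (mat_size - 0).toNat 0 rfl (by omega)⟩
          · exact ⟨0, le_rfl, by omega,
              rowA_false_y mat_size x y max_x max_y park 0 0 (by omega) (by omega)
                (mat_size - 0).toNat 0 rfl le_rfl⟩
        · exact ⟨mat_size - 1, by omega, by omega,
            rowA_false_x mat_size x y max_x max_y park (mat_size - 1) 0 (by omega) (by omega)⟩
      · exact ⟨0, le_rfl, by omega,
          rowA_false_x mat_size x y max_x max_y park 0 0 (by omega) (by omega)⟩
    obtain ⟨i0, hi0a, hi0b, hrow⟩ := hcell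
    exact outerA_false mat_size x y max_x max_y park i0 hi0b hrow
      (mat_size - 0).toNat 0 rfl hi0a

theorem check_changed : Claim_changed_check := by
  unfold Claim_changed_check
  refine ⟨by decide, by decide, by decide, ?_, by decide, by decide⟩
  show check 0 (-1) 0 0 0 [] = true
  unfold check checkOuterA
  rw [if_neg (by omega)]

theorem check_tight : Claim_exact_check := by
  intro mat_size x y max_x max_y park _hdom _hpre hD
  obtain ⟨hm0, hb⟩ := hD
  subst hm0
  unfold check check_alt checkOuterA
  rw [if_neg (by omega), if_neg (by omega)]
  simp
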